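-- pv_equiv track=rewrite | github.com/eddyyxxyy/guppe | exercicios/secao08/ex24.py | asterisk_tree
-- ===== SOURCE A (Python) =====
-- def asterisk_tree(numero: int) -> str:
--     my_list = []
--     result_string = ''
--     for i in range(numero + 1):
--         for j in range(numero):
--             if i == numero - j:
--                 my_list.append((' ' * j) + ('*' * (2 * i - 1)))
--     for element in my_list:
--         result_string += element + '\n'
--     return result_string
-- ===== SOURCE B (Python) =====
-- def asterisk_tree(numero: int) -> str:
--     # One pass: row i (1..numero) is (numero - i) spaces + (2i - 1) asterisks.
--     return ''.join(
--         ' ' * (numero - i) + '*' * (2 * i - 1) + '\n'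
--         for i in range(1, numero + 1)
--     )
-- ===== Notes on version B (the rewrite author's own statement) =====
-- stated objective: faster
-- what changed: Removes the inner loop that scans every j to find the one with i == numero - j, computing the indent numero - i directly and joining the rows; intended as faster (measured about 7x at the largest size both finished; the output itself has Theta(n^2) characters, so both stay quadratic overall).
import Mathlib
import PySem

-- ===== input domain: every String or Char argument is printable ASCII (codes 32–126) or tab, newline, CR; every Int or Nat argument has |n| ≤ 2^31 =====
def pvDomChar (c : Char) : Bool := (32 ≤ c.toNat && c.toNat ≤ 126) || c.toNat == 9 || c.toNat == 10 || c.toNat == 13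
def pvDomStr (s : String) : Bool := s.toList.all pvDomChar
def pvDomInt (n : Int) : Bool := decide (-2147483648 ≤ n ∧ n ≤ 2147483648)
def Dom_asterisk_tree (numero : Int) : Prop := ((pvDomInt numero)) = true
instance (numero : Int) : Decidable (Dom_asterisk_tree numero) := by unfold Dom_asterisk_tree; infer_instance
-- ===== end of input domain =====

-- B computes each row's indent numero - i directly instead of A's inner scan over all j; intended as faster (measured ~7x at the largest size both finished; the output itself is quadratic, so both remain so overall).

-- ===== PORT A =====
-- literal port of A: nested loops build my_list, then a concatenation loop builds the result
def asterisk_tree (numero : Int) : String :=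
  let my_list : List (List Char) :=
    (PySem.List.pyRange 0 (numero + 1) 1).foldl (fun acc i =>
      (PySem.List.pyRange 0 numero 1).foldl (fun acc2 j =>
        if i = numero - j then
          acc2 ++ [List.replicate j.toNat ' ' ++ List.replicate (2 * i - 1).toNat '*']
        else acc2) acc) []
  String.ofList (my_list.foldl (fun s e => s ++ e ++ ['\n']) [])

-- ===== PORT B =====
-- literal port of B: ''.join of the rows for i in range(1, numero+1)
def asterisk_tree_alt (numero : Int) : String :=
  String.ofList (PySem.Chars.join []
    ((PySem.List.pyRange 1 (numero + 1) 1).map (fun i =>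
      List.replicate (numero - i).toNat ' ' ++ List.replicate (2 * i - 1).toNat '*' ++ ['\n'])))

-- ===== PRECONDITION & SPEC =====
def Spec_asterisk_tree (numero : Int) (out : String) : Prop := out = asterisk_tree_alt numero
instance (numero : Int) (out : String) : Decidable (Spec_asterisk_tree numero out) := by unfold Spec_asterisk_tree; infer_instance

-- ===== CLAIM (what is proved, stated in full; the proofs are below) =====
def Claim_equal_asterisk_tree : Prop := ∀ (numero : Int), Dom_asterisk_tree numero → Spec_asterisk_tree numero (asterisk_tree numero)

-- ===== LEMMAS AND PROOFS =====

-- the row built for index i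
def pvRow (numero i : Int) : List Char :=
  List.replicate (numero - i).toNat ' ' ++ List.replicate (2 * i - 1).toNat '*'

-- inner loop: append-if is filter-map
theorem pv_foldl_append_ite {α β : Type} (p : α → Prop) [DecidablePred p] (f : α → β)
    (l : List α) (acc : List β) :
    l.foldl (fun a x => if p x then a ++ [f x] else a) acc
      = acc ++ (l.filter (fun x => decide (p x))).map f := by
  induction l generalizing acc with
  | nil => simp
  | cons x xs ih =>
    simp only [List.foldl_cons, List.filter_cons]
    by_cases h : p x <;> simp [h, ih]

-- concatenation loop: acc ++ e ++ ['\n'] folded is flatMap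
theorem pv_foldl_concat_newline (l : List (List Char)) (acc : List Char) :
    l.foldl (fun s e => s ++ e ++ ['\n']) acc = acc ++ l.flatMap (fun e => e ++ ['\n']) := by
  induction l generalizing acc with
  | nil => simp
  | cons x xs ih => simp [List.flatMap_def]

-- filtering a duplicate-free list for one value
theorem pv_filter_nodup (a : Int) (l : List Int) (h : l.Nodup) :
    l.filter (fun x => x == a) = if a ∈ l then [a] else [] := by
  induction l with
  | nil => simp
  | cons x xs ih =>
    rcases List.nodup_cons.mp h with ⟨hx, hxs⟩
    by_cases hxa : x = a
    · subst hxa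
      have hnil : xs.filter (fun y => y == x) = [] :=
        List.filter_eq_nil_iff.mpr (fun b hb => by
          simp only [beq_iff_eq]
          intro hbx; exact hx (hbx ▸ hb))
      simp [hnil]
    · have hax : ¬a = x := fun h' => hxa h'.symm
      simp [hxa, ih hxs, List.mem_cons, hax]

-- the filter in the inner loop keeps exactly j = numero - i (when in range)
theorem pv_filter_range (numero i : Int) :
    ((PySem.List.pyRange 0 numero 1).filter (fun j => decide (i = numero - j)))
      = if 1 ≤ i ∧ i ≤ numero then [numero - i] else [] := by
  have hcong : ((PySem.List.pyRange 0 numero 1).filter (fun j => decide (i = numero - j)))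
      = ((PySem.List.pyRange 0 numero 1).filter (fun j => j == numero - i)) := by
    apply List.filter_congr
    intro j _
    rw [Bool.eq_iff_iff]
    simp
    omega
  rw [hcong, pv_filter_nodup _ _ (PySem.List.nodup_pyRange_one (a := 0) (b := numero))]
  by_cases h : 1 ≤ i ∧ i ≤ numero
  · rw [if_pos h, if_pos (by rw [PySem.List.mem_pyRange_one]; omega)]
  · rw [if_neg h, if_neg (by rw [PySem.List.mem_pyRange_one]; omega)]

-- append loop is flatMap (generic)
theorem pv_foldl_append_flatMap {α β : Type} (g : α → List β) (l : List α) (acc : List β) :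
    l.foldl (fun a x => a ++ g x) acc = acc ++ l.flatMap g := by
  induction l generalizing acc with
  | nil => simp
  | cons x xs ih => simp [ih, List.flatMap_def]

-- flatMap of guarded singletons is map when the guard holds everywhere
theorem pv_flatMap_singleton {α β : Type} (c : α → Prop) [DecidablePred c] (f : α → β)
    (l : List α) (h : ∀ x ∈ l, c x) :
    l.flatMap (fun x => if c x then [f x] else []) = l.map f := by
  induction l with
  | nil => simp
  | cons x xs ih =>
    simp only [List.flatMap_cons, List.map_cons]
    rw [if_pos (h x List.mem_cons_self), ih (fun y hy => h y (List.mem_cons_of_mem x hy))]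
    simp

-- ''.join is flatten
theorem pv_intercalate_nil : ∀ (l : List (List Char)), List.intercalate ([] : List Char) l = l.flatten
  | [] => by simp only [List.intercalate]; simp
  | [x] => by simp only [List.intercalate]; simp
  | x :: y :: zs => by
    have ih := pv_intercalate_nil (y :: zs)
    simp only [List.intercalate, List.intersperse_cons₂, List.flatten_cons] at ih ⊢
    simp [ih]

-- A's my_list is exactly the rows for i in range(1, numero+1)
theorem pv_my_list_eq (numero : Int) :
    ((PySem.List.pyRange 0 (numero + 1) 1).foldl (fun acc i =>
      (PySem.List.pyRange 0 numero 1).foldl (fun acc2 j =>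
        if i = numero - j then
          acc2 ++ [List.replicate j.toNat ' ' ++ List.replicate (2 * i - 1).toNat '*']
        else acc2) acc) [])
      = (PySem.List.pyRange 1 (numero + 1) 1).map (pvRow numero) := by
  have hinner : ∀ (i : Int) (acc : List (List Char)),
      (PySem.List.pyRange 0 numero 1).foldl (fun acc2 j =>
        if i = numero - j then
          acc2 ++ [List.replicate j.toNat ' ' ++ List.replicate (2 * i - 1).toNat '*']
        else acc2) acc
      = acc ++ (if 1 ≤ i ∧ i ≤ numero then [pvRow numero i] else []) := by
    intro i acc
    rw [pv_foldl_append_ite (fun j => i = numero - j)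
      (fun j => List.replicate j.toNat ' ' ++ List.replicate (2 * i - 1).toNat '*')]
    rw [pv_filter_range numero i]
    by_cases h : 1 ≤ i ∧ i ≤ numero <;> simp [h, pvRow]
  simp only [hinner]
  rw [pv_foldl_append_flatMap (fun i => if 1 ≤ i ∧ i ≤ numero then [pvRow numero i] else [])]
  rw [List.nil_append]
  by_cases hn : 0 ≤ numero
  · rw [PySem.List.pyRange_one_append 0 1 (numero + 1) (by omega) (by omega)]
    rw [List.flatMap_append]
    have h01 : PySem.List.pyRange 0 1 1 = [0] := by decide
    rw [h01]
    simp only [List.flatMap_cons, List.flatMap_nil]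
    rw [if_neg (by omega), List.nil_append, List.nil_append]
    exact pv_flatMap_singleton _ (pvRow numero) _ (fun i hi => by
      rw [PySem.List.mem_pyRange_one] at hi; omega)
  · rw [PySem.List.pyRange_one_eq_nil (by omega), PySem.List.pyRange_one_eq_nil (by omega)]
    simp

-- ===== VERDICT (by name: the statement is the Claim_ definition above) =====
theorem asterisk_tree_spec : Claim_equal_asterisk_tree := by
  intro numero _
  unfold Spec_asterisk_tree asterisk_tree asterisk_tree_alt
  dsimp only
  rw [pv_my_list_eq numero]
  rw [pv_foldl_concat_newline, List.nil_append, List.flatMap_map]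
  simp only [PySem.Chars.join]
  rw [pv_intercalate_nil]
  rw [List.flatten_eq_flatMap, List.flatMap_map]
  simp [pvRow]
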